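-- pv_equiv track=rewrite | github.com/atmz/advent-of-code | aoc2024/12/code.py | calculate_distinct_boundaries
-- ===== SOURCE A (Python) =====
-- def should_count_boundary(x,y,dir,set_counted_boundaries):
--     # so if we have a horzontal line (i.e. dir is in the y axis)
--     # we need to look and see if we've counted a boundary to the left or right
--     # in the *same* direction (inside and outside sides are distinct)
--     if dir[0] == 0:
--         if (x-1, y, dir) in set_counted_boundaries or (x+1, y, dir) in set_counted_boundaries:
--             return False
--     else:
--         if (x, y-1, dir) in set_counted_boundaries or (x, y+1, dir) in set_counted_boundaries:
--             return False
--     return True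
--
-- def calculate_distinct_boundaries(set_boundaries):
--     counted_boundaries = set()
--     score=0
--     boundaries_in_order = sorted(list(set_boundaries))
--     for boundary in boundaries_in_order:
--         if should_count_boundary(boundary[0], boundary[1], boundary[2], counted_boundaries):
--             score+=1
--         counted_boundaries.add(boundary)
--     return score
-- ===== SOURCE B (Python) =====
-- def calculate_distinct_boundaries(set_boundaries):
--     # Count run-starts directly: a boundary segment starts a new distinct side
--     # exactly when its predecessor along the varying axis is absent.
--     s = set(set_boundaries)
--     score = 0
--     for (x, y, d) in set_boundaries:
--         prev = (x - 1, y, d) if d[0] == 0 else (x, y - 1, d)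
--         if prev not in s:
--             score += 1
--     return score
-- ===== Notes on version B (the rewrite author's own statement) =====
-- stated objective: simpler
-- what changed: Replaces A's sort + incrementally-grown counted set (count a segment if no already-counted neighbour) with a single pass that counts a segment exactly when its predecessor along the varying axis is absent from the input set.
import Mathlib
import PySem

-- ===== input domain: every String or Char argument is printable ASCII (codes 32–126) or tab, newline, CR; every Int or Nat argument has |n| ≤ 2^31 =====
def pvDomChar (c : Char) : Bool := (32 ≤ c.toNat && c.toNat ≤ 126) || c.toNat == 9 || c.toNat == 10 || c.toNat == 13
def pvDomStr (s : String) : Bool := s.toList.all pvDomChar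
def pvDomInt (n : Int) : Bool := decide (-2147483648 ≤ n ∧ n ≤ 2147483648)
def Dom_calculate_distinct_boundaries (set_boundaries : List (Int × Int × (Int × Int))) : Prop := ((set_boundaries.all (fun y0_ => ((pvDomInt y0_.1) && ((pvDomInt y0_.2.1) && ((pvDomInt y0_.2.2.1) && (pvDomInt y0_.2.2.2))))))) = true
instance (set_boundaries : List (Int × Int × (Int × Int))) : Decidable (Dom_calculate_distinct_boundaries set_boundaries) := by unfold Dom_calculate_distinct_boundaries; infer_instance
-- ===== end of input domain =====

-- B counts each boundary directly by testing whether its predecessor along the varying axis is absent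
-- from the input set, replacing A's sort + incremental counted-set loop (objective: simpler).

-- ===== PORT A =====
-- Python '<' on these 4-int nested tuples is lexicographic; pvLexLt is exactly that comparison.
def pvLexLt (a b : Int × Int × (Int × Int)) : Bool :=
  decide (a.1 < b.1 ∨ (a.1 = b.1 ∧ (a.2.1 < b.2.1 ∨ (a.2.1 = b.2.1 ∧
    (a.2.2.1 < b.2.2.1 ∨ (a.2.2.1 = b.2.2.1 ∧ a.2.2.2 < b.2.2.2))))))

def should_count_boundary (x y : Int) (dir : Int × Int)
    (set_counted_boundaries : PySem.Set (Int × Int × (Int × Int))) : Bool :=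
  if dir.1 == 0 then
    if PySem.Set.contains set_counted_boundaries (x - 1, y, dir)
        || PySem.Set.contains set_counted_boundaries (x + 1, y, dir) then false
    else true
  else
    if PySem.Set.contains set_counted_boundaries (x, y - 1, dir)
        || PySem.Set.contains set_counted_boundaries (x, y + 1, dir) then false
    else true

def calculate_distinct_boundaries (set_boundaries : List (Int × Int × (Int × Int))) : Int :=
  -- sorted(list(set_boundaries)): stable insertion sort with Python's tuple '<' (pvLexLt); exact
  let boundaries_in_order :=
    set_boundaries.foldl (fun acc b => PySem.List.insertBy pvLexLt b acc) []
  let st := boundaries_in_order.foldl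
    (fun (st : PySem.Set (Int × Int × (Int × Int)) × Int) boundary =>
      let score := if should_count_boundary boundary.1 boundary.2.1 boundary.2.2 st.1
                   then st.2 + 1 else st.2
      (PySem.Set.add st.1 boundary, score))
    (PySem.Set.empty, 0)
  st.2

-- ===== PORT B =====
def calculate_distinct_boundaries_alt (set_boundaries : List (Int × Int × (Int × Int))) : Int :=
  let s := PySem.Set.ofList set_boundaries
  set_boundaries.foldl
    (fun score b =>
      let prev := if b.2.2.1 == 0 then (b.1 - 1, b.2.1, b.2.2) else (b.1, b.2.1 - 1, b.2.2)
      if PySem.Set.contains s prev then score else score + 1)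
    0

-- ===== PRECONDITION & SPEC =====
def Spec_calculate_distinct_boundaries (set_boundaries : List (Int × Int × (Int × Int))) (out : Int) : Prop := out = calculate_distinct_boundaries_alt set_boundaries
instance (set_boundaries : List (Int × Int × (Int × Int))) (out : Int) : Decidable (Spec_calculate_distinct_boundaries set_boundaries out) := by unfold Spec_calculate_distinct_boundaries; infer_instance

-- ===== CLAIM (what is proved, stated in full; the proofs are below) =====
def Claim_equal_calculate_distinct_boundaries : Prop := ∀ (set_boundaries : List (Int × Int × (Int × Int))), Dom_calculate_distinct_boundaries set_boundaries → Spec_calculate_distinct_boundaries set_boundaries (calculate_distinct_boundaries set_boundaries)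

-- ===== LEMMAS AND PROOFS =====

-- the predecessor of a boundary along its varying axis
def pvPrev (b : Int × Int × (Int × Int)) : Int × Int × (Int × Int) :=
  if b.2.2.1 == 0 then (b.1 - 1, b.2.1, b.2.2) else (b.1, b.2.1 - 1, b.2.2)

-- "b starts a run": its predecessor is not in the input
def pvKeep (full : List (Int × Int × (Int × Int))) (b : Int × Int × (Int × Int)) : Bool :=
  !(decide (pvPrev b ∈ full))

theorem pvLexLt_irrefl (a : Int × Int × (Int × Int)) : pvLexLt a a = false := by
  obtain ⟨a1, a2, a3, a4⟩ := a; simp [pvLexLt]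

theorem pvLexLt_asymm {a b : Int × Int × (Int × Int)} (h : pvLexLt a b = true) :
    pvLexLt b a = false := by
  obtain ⟨a1, a2, a3, a4⟩ := a; obtain ⟨b1, b2, b3, b4⟩ := b
  simp [pvLexLt] at h ⊢; omega

theorem pvLexLt_trans {a b c : Int × Int × (Int × Int)} (h1 : pvLexLt a b = true)
    (h2 : pvLexLt b c = true) : pvLexLt a c = true := by
  obtain ⟨a1, a2, a3, a4⟩ := a; obtain ⟨b1, b2, b3, b4⟩ := b; obtain ⟨c1, c2, c3, c4⟩ := c
  simp [pvLexLt] at h1 h2 ⊢; omega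

theorem pvLexLt_prev (b : Int × Int × (Int × Int)) : pvLexLt (pvPrev b) b = true := by
  obtain ⟨b1, b2, b3, b4⟩ := b
  by_cases h : b3 = 0 <;> simp [pvPrev, pvLexLt, h]

theorem pv_insertBy_perm (x : Int × Int × (Int × Int)) (ys : List (Int × Int × (Int × Int))) :
    (PySem.List.insertBy pvLexLt x ys).Perm (x :: ys) := by
  induction ys with
  | nil => simp [PySem.List.insertBy]
  | cons y ys ih =>
    simp only [PySem.List.insertBy]
    split
    · exact List.Perm.refl _
    · exact (ih.cons y).trans (List.Perm.swap x y ys)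

theorem pv_insertBy_pairwise (x : Int × Int × (Int × Int))
    (ys : List (Int × Int × (Int × Int)))
    (h : ys.Pairwise (fun a b => pvLexLt b a = false)) :
    (PySem.List.insertBy pvLexLt x ys).Pairwise (fun a b => pvLexLt b a = false) := by
  induction ys with
  | nil => simp [PySem.List.insertBy]
  | cons y ys ih =>
    rw [List.pairwise_cons] at h
    obtain ⟨hy, hys⟩ := h
    simp only [PySem.List.insertBy]
    split
    · rename_i hxy
      refine List.pairwise_cons.2 ⟨?_, List.pairwise_cons.2 ⟨hy, hys⟩⟩
      intro z hz
      rcases List.mem_cons.1 hz with rfl | hz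
      · exact pvLexLt_asymm hxy
      · by_contra hc
        have hzx : pvLexLt z x = true := by
          cases hzx : pvLexLt z x with
          | true => rfl
          | false => exact absurd hzx hc
        have := pvLexLt_trans hzx hxy
        rw [hy z hz] at this; exact Bool.false_ne_true this
    · rename_i hxy
      refine List.pairwise_cons.2 ⟨?_, ih hys⟩
      intro z hz
      rcases (PySem.List.mem_insertBy pvLexLt x z ys).1 hz with rfl | hz
      · exact Bool.not_eq_true _ ▸ (by simpa using hxy)
      · exact hy z hz

theorem pv_sort_perm_aux (xs acc : List (Int × Int × (Int × Int))) :
    (xs.foldl (fun acc b => PySem.List.insertBy pvLexLt b acc) acc).Perm (xs ++ acc) := by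
  induction xs generalizing acc with
  | nil => simp
  | cons x xs ih =>
    simp only [List.foldl_cons]
    refine (ih (PySem.List.insertBy pvLexLt x acc)).trans ?_
    refine ((List.Perm.append_left xs (pv_insertBy_perm x acc)).trans ?_)
    exact (List.perm_middle).trans (List.Perm.refl _)

theorem pv_sort_pairwise_aux (xs acc : List (Int × Int × (Int × Int)))
    (h : acc.Pairwise (fun a b => pvLexLt b a = false)) :
    (xs.foldl (fun acc b => PySem.List.insertBy pvLexLt b acc) acc).Pairwise
      (fun a b => pvLexLt b a = false) := by
  induction xs generalizing acc with
  | nil => simpa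
  | cons x xs ih => exact ih _ (pv_insertBy_pairwise x acc h)

theorem pv_contains_iff (s : List (Int × Int × (Int × Int))) (z : Int × Int × (Int × Int)) :
    PySem.Set.contains s z = true ↔ z ∈ s := by
  simp [PySem.Set.contains]

theorem pv_shc_eq (e : Int × Int × (Int × Int)) (s full : List (Int × Int × (Int × Int)))
    (h1 : ∀ a ∈ s, pvLexLt e a = false)
    (h2 : pvPrev e ∈ s ↔ pvPrev e ∈ full) :
    should_count_boundary e.1 e.2.1 e.2.2 s = pvKeep full e := by
  obtain ⟨x, y, d1, d2⟩ := e
  have hnot : ∀ n, pvLexLt (x, y, d1, d2) n = true → n ∉ s := by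
    intro n hn hmem
    rw [h1 n hmem] at hn; exact absurd hn (by simp)
  by_cases hd : d1 = 0
  · subst hd
    rw [show pvPrev (x, y, 0, d2) = (x - 1, y, 0, d2) from by simp [pvPrev]] at h2
    have hn2 : (x + 1, y, 0, d2) ∉ s := hnot _ (by simp [pvLexLt])
    by_cases hcm : (x - 1, y, 0, d2) ∈ s
    · have hm : (x - 1, y, 0, d2) ∈ full := h2.1 hcm
      simp [should_count_boundary, pvKeep, pvPrev, hcm, hm]
    · have hm : (x - 1, y, 0, d2) ∉ full := fun h => hcm (h2.2 h)
      simp [should_count_boundary, pvKeep, pvPrev, hcm, hn2, hm]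
  · rw [show pvPrev (x, y, d1, d2) = (x, y - 1, d1, d2) from by simp [pvPrev, hd]] at h2
    have hn2 : (x, y + 1, d1, d2) ∉ s := hnot _ (by simp [pvLexLt])
    by_cases hcm : (x, y - 1, d1, d2) ∈ s
    · have hm : (x, y - 1, d1, d2) ∈ full := h2.1 hcm
      simp [should_count_boundary, pvKeep, pvPrev, hd, hcm, hm]
    · have hm : (x, y - 1, d1, d2) ∉ full := fun h => hcm (h2.2 h)
      simp [should_count_boundary, pvKeep, pvPrev, hd, hcm, hn2, hm]

theorem pv_loopA (ys : List (Int × Int × (Int × Int))) :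
    ∀ (p s : List (Int × Int × (Int × Int))) (score : Int)
      (full : List (Int × Int × (Int × Int))),
    (p ++ ys).Pairwise (fun a b => pvLexLt b a = false) →
    (∀ z, z ∈ s ↔ z ∈ p) →
    (∀ z, z ∈ full ↔ z ∈ p ++ ys) →
    (ys.foldl
      (fun (st : PySem.Set (Int × Int × (Int × Int)) × Int) boundary =>
        let score := if should_count_boundary boundary.1 boundary.2.1 boundary.2.2 st.1
                     then st.2 + 1 else st.2
        (PySem.Set.add st.1 boundary, score)) (s, score)).2
      = score + (ys.countP (pvKeep full) : Int) := by
  induction ys with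
  | nil => intro p s score full _ _ _; simp
  | cons e ys ih =>
    intro p s score full hpw hs hfull
    have hpw' : (p ++ e :: ys).Pairwise (fun a b => pvLexLt b a = false) := hpw
    rw [List.pairwise_append] at hpw'
    obtain ⟨hp, hey, hcross⟩ := hpw'
    rw [List.pairwise_cons] at hey
    obtain ⟨he, hys⟩ := hey
    -- the should_count test at e equals pvKeep full e
    have h1 : ∀ a ∈ s, pvLexLt e a = false := fun a ha => hcross a ((hs a).1 ha) e (by simp)
    have hprev_not : pvPrev e ∉ e :: ys := by
      intro hmem
      rcases List.mem_cons.1 hmem with hEq | hmem'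
      · have := pvLexLt_prev e; rw [hEq] at this
        rw [pvLexLt_irrefl e] at this; exact Bool.false_ne_true this
      · have := he _ hmem'
        rw [pvLexLt_prev e] at this; exact absurd this (by simp)
    have h2 : pvPrev e ∈ s ↔ pvPrev e ∈ full := by
      rw [hs, hfull, List.mem_append]
      constructor
      · exact Or.inl
      · rintro (h | h)
        · exact h
        · exact absurd h hprev_not
    have hshc : should_count_boundary e.1 e.2.1 e.2.2 s = pvKeep full e := pv_shc_eq e s full h1 h2
    simp only [List.foldl_cons]
    have hstep := ih (p ++ [e]) (PySem.Set.add s e)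
      (if should_count_boundary e.1 e.2.1 e.2.2 s then score + 1 else score) full
      (by simpa using hpw)
      (by
        intro z
        rw [PySem.Set.mem_add, hs]
        simp [or_comm])
      (by intro z; rw [hfull]; simp)
    rw [hstep, hshc, List.countP_cons]
    by_cases hk : pvKeep full e = true
    · simp [hk]; ring
    · simp only [Bool.not_eq_true] at hk
      simp [hk]

theorem pv_loopB (xs : List (Int × Int × (Int × Int))) :
    ∀ (s : List (Int × Int × (Int × Int))) (score : Int),
    xs.foldl
      (fun score b =>
        let prev := if b.2.2.1 == 0 then (b.1 - 1, b.2.1, b.2.2) else (b.1, b.2.1 - 1, b.2.2)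
        if PySem.Set.contains s prev then score else score + 1) score
      = score + (xs.countP (fun b => !(PySem.Set.contains s (pvPrev b))) : Int) := by
  induction xs with
  | nil => intro s score; simp
  | cons b xs ih =>
    intro s score
    simp only [List.foldl_cons, List.countP_cons]
    have hb : (if b.2.2.1 == 0 then (b.1 - 1, b.2.1, b.2.2) else (b.1, b.2.1 - 1, b.2.2)) = pvPrev b := by
      simp [pvPrev]
    rw [hb]
    cases hc : PySem.Set.contains s (pvPrev b) with
    | true => rw [ih]; simp
    | false => rw [ih]; simp; ring

-- ===== VERDICT (by name: the statement is the Claim_ definition above) =====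
theorem calculate_distinct_boundaries_spec : Claim_equal_calculate_distinct_boundaries := by
  intro xs _
  unfold Spec_calculate_distinct_boundaries
  unfold calculate_distinct_boundaries calculate_distinct_boundaries_alt
  have hperm : (xs.foldl (fun acc b => PySem.List.insertBy pvLexLt b acc) []).Perm xs := by
    simpa using pv_sort_perm_aux xs []
  have hpw := pv_sort_pairwise_aux xs [] (by simp)
  have hA := pv_loopA (xs.foldl (fun acc b => PySem.List.insertBy pvLexLt b acc) []) [] PySem.Set.empty 0 xs
    (by simpa using hpw)
    (by intro z; simp [PySem.Set.empty])
    (by intro z; simpa using (hperm.mem_iff).symm)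
  have hB := pv_loopB xs (PySem.Set.ofList xs) 0
  simp only [] at hA hB ⊢
  rw [hA, hB]
  have hcount : ((xs.foldl (fun acc b => PySem.List.insertBy pvLexLt b acc) []).countP (pvKeep xs))
      = xs.countP (pvKeep xs) := hperm.countP_eq _
  rw [hcount]
  have hco : ∀ z, PySem.Set.contains (PySem.Set.ofList xs) z = decide (z ∈ xs) := by
    intro z
    by_cases hm : z ∈ xs
    · rw [(pv_contains_iff _ _).2 ((PySem.Set.mem_ofList xs z).2 hm)]; simp [hm]
    · have hz : PySem.Set.contains (PySem.Set.ofList xs) z = false := by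
        cases hc2 : PySem.Set.contains (PySem.Set.ofList xs) z with
        | false => rfl
        | true => exact absurd ((PySem.Set.mem_ofList xs z).1 ((pv_contains_iff _ _).1 hc2)) hm
      rw [hz]; simp [hm]
  have hfun : (fun b => !(PySem.Set.ofList xs).contains (pvPrev b)) = pvKeep xs := by
    funext b
    rw [hco (pvPrev b)]
    simp [pvKeep]
  rw [show (xs.countP fun b => !(PySem.Set.ofList xs).contains (pvPrev b))
      = xs.countP (pvKeep xs) from by rw [hfun]]
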